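-- pv_equiv track=rewrite | github.com/sang-gyeong/Coding_Test | test.py | solution
-- ===== SOURCE A (Python) =====
-- def solution(s):
--     answer = len(s)
--     for length in range(1, (len(s)//2)+1):
--       count = 0
--       arr = []
--       for i in range(0, len(s), length):
--         arr.append(s[i:i+length])
--         target = arr[0]
--         overlap = 1
--       arr.append('')
--       for i in range(1, len(arr)):
--         current = arr[i]
--         if target == current:
--           overlap += 1
--         else:
--           if overlap > 1:
--             count += (overlap//10) + 1
--           count += len(target)
--           target = current
--           overlap = 1
--       count += len(current)
--       if answer > count:
--         answer = count
--
--     return answer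
-- ===== SOURCE B (Python) =====
-- def solution(s):
--     n = len(s)
--     best = n
--     for L in range(1, n // 2 + 1):
--         k = -(-n // L)  # number of length-L chunks (last may be short)
--         # positions where a new run of equal chunks begins
--         brks = [i for i in range(1, k)
--                 if s[(i - 1) * L:i * L] != s[i * L:(i + 1) * L]]
--         edges = [0] + brks + [k]
--         cost = sum(len(s[b * L:(b + 1) * L])
--                    + ((e - b) // 10 + 1 if e - b > 1 else 0)
--                    for b, e in zip(edges, edges[1:]))
--         best = min(best, cost)
--     return best
-- ===== Notes on version B (the rewrite author's own statement) =====
-- stated objective: alternative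
-- what changed: Instead of chunking the string and run-length-encoding the chunk list with a run accumulator, B never materialises a chunk list or tracks run state: per length it computes the list of break positions (indices whose slice differs from the previous slice) with one comprehension, zips consecutive break edges into (start,end) pairs, and sums each pair's cost len(s[b*L:(b+1)*L]) + ((e-b)//10+1 if e-b>1 else 0).
import Mathlib
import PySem

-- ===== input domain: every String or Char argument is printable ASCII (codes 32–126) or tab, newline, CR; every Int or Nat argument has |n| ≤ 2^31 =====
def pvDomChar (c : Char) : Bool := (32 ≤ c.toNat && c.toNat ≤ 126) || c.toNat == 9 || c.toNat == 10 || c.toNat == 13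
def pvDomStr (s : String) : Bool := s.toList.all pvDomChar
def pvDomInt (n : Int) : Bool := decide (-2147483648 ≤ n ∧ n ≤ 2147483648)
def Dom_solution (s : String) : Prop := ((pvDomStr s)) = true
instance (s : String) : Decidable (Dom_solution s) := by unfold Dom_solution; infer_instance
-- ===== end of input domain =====

-- B drops A's chunk list and stateful run tracking (target/overlap with a ''
-- sentinel): per length it builds the list of break positions by comparing
-- adjacent slices, zips consecutive edges and sums each run's cost; objective:
-- alternative decomposition of the same O(n^2) task.

-- ===== PORT A =====
-- A's first inner loop: arr = [s[i:i+length] for i in range(0, len(s), length)]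
def pvChunks (cs : List Char) (L : Int) : List (List Char) :=
  (PySem.List.pyRange 0 (cs.length : Int) L).map
    (fun i => PySem.List.slice cs (some i) (some (i + L)))

-- one iteration of A's second loop; state = (count, target, overlap, current)
def pvStepA (st : Int × List Char × Int × List Char) (current : List Char) :
    Int × List Char × Int × List Char :=
  let (count, target, overlap, _) := st
  if target = current then (count, target, overlap + 1, current)
  else
    let count := if overlap > 1 then count + PySem.Int.floordiv overlap 10 + 1 else count
    (count + (target.length : Int), current, 1, current)

def solution (s : String) : Int :=
  let cs := s.toList
  let n : Int := (cs.length : Int)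
  (PySem.List.pyRange 1 (PySem.Int.floordiv n 2 + 1) 1).foldl
    (fun answer L =>
      let arr := pvChunks cs L ++ [[]]
      -- target = arr[0], overlap = 1 after the first loop; current starts unset
      let st := (arr.drop 1).foldl pvStepA (0, (pvChunks cs L).headD [], 1, [])
      let count := st.1 + ((st.2.2.2).length : Int)
      if answer > count then count else answer)
    n

-- ===== PORT B =====
def solution_alt (s : String) : Int :=
  let cs := s.toList
  let n : Int := (cs.length : Int)
  (PySem.List.pyRange 1 (PySem.Int.floordiv n 2 + 1) 1).foldl
    (fun best L =>
      -- k = -(-n // L): number of length-L chunks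
      let k : Int := -(PySem.Int.floordiv (-n) L)
      -- brks = [i for i in range(1, k) if s[(i-1)*L:i*L] != s[i*L:(i+1)*L]]
      let brks : List Int := (PySem.List.pyRange 1 k 1).filter
        (fun i => !(PySem.List.slice cs (some ((i - 1) * L)) (some (i * L)) ==
                    PySem.List.slice cs (some (i * L)) (some ((i + 1) * L))))
      -- edges = [0] + brks + [k]
      let edges : List Int := 0 :: (brks ++ [k])
      -- cost = sum(len(s[b*L:(b+1)*L]) + ((e-b)//10+1 if e-b>1 else 0)
      --            for b, e in zip(edges, edges[1:]))
      let cost : Int := ((edges.zip (edges.drop 1)).map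
        (fun be =>
          ((PySem.List.slice cs (some (be.1 * L)) (some ((be.1 + 1) * L))).length : Int)
            + (if 1 < be.2 - be.1
               then PySem.Int.floordiv (be.2 - be.1) 10 + 1 else 0))).sum
      min best cost)
    n

-- ===== PRECONDITION & SPEC =====
def Spec_solution (s : String) (out : Int) : Prop := out = solution_alt s
instance (s : String) (out : Int) : Decidable (Spec_solution s out) := by unfold Spec_solution; infer_instance

-- ===== CLAIM (what is proved, stated in full; the proofs are below) =====
def Claim_equal_solution : Prop := ∀ (s : String), Dom_solution s → Spec_solution s (solution s)

-- ===== LEMMAS AND PROOFS =====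

-- penalty a maximal run of r equal chunks contributes: (r//10)+1 when r > 1
def pvPen (r : Nat) : Int :=
  if 1 < r then PySem.Int.floordiv (r : Int) 10 + 1 else 0

-- reference run-length cost of a chunk list, one maximal run at a time
def pvRleCost : List (List Char) → Int
  | [] => 0
  | head :: rest =>
    let a : Nat := (rest.takeWhile (fun c => c == head)).length
    (head.length : Int) + pvPen (a + 1) + pvRleCost (rest.drop a)
  termination_by xs => xs.length
  decreasing_by simp

-- ---------- A-side: A's stateful fold computes pvRleCost ----------

lemma pvStepA_fold (t : List (List Char)) (count : Int) (target : List Char)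
    (overlap : Int) (cur : List Char)
    (htgt : target ≠ []) (ht : ∀ c ∈ t, c ≠ []) (hov : 1 ≤ overlap) :
    (((t ++ [[]]).foldl pvStepA (count, target, overlap, cur)).1
      + ((((t ++ [[]]).foldl pvStepA (count, target, overlap, cur)).2.2.2).length : Int))
    = count + (target.length : Int)
      + (if 1 < overlap + ((t.takeWhile (fun c => c == target)).length : Int)
          then PySem.Int.floordiv (overlap + ((t.takeWhile (fun c => c == target)).length : Int)) 10 + 1 else 0)
      + pvRleCost (t.drop (t.takeWhile (fun c => c == target)).length) := by
  induction t generalizing count target overlap cur with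
  | nil =>
    simp only [List.nil_append, List.foldl_cons, List.foldl_nil, pvStepA,
      List.takeWhile_nil, List.length_nil, List.drop_nil, pvRleCost]
    rw [if_neg htgt]
    simp only [Nat.cast_zero, add_zero, List.length_nil, Nat.cast_zero]
    split_ifs with h1 <;> omega
  | cons c t' ih =>
    by_cases hc : target = c
    · subst hc
      simp only [List.cons_append, List.foldl_cons, pvStepA, if_true]
      rw [ih count target (overlap+1) target htgt (fun x hx => ht x (by simp [hx])) (by omega)]
      have hrl : (List.takeWhile (fun c => c == target) (target :: t')).length
          = (List.takeWhile (fun c => c == target) t').length + 1 := by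
        simp
      rw [hrl]
      have hdrop : List.drop ((List.takeWhile (fun c => c == target) t').length + 1) (target :: t')
          = List.drop (List.takeWhile (fun c => c == target) t').length t' := rfl
      rw [hdrop]
      have hc2 : overlap + 1 + ((List.takeWhile (fun c => c == target) t').length : Int)
           = overlap + (((List.takeWhile (fun c => c == target) t').length + 1 : Nat) : Int) := by
        push_cast; ring
      rw [hc2]
    · simp only [List.cons_append, List.foldl_cons, pvStepA, if_neg hc]
      rw [ih _ c 1 c (ht c (by simp)) (fun x hx => ht x (by simp [hx])) le_rfl]
      have hrl : (List.takeWhile (fun c' => c' == target) (c :: t')).length = 0 := by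
        simp [List.takeWhile_cons]
        intro h; exact absurd h.symm hc
      rw [hrl]
      simp only [Nat.cast_zero, add_zero, List.drop_zero]
      rw [pvRleCost]
      simp only [pvPen]
      have hcast : (((List.takeWhile (fun c' => c' == c) t').length + 1 : Nat) : Int)
                 = 1 + ((List.takeWhile (fun c' => c' == c) t').length : Int) := by
        push_cast; ring
      rw [hcast]
      split_ifs with h1 h2 h3 h4 <;> omega

lemma pvChunks_ne_nil {cs : List Char} {L : Int} (hL : 0 < L) (hn : 0 < cs.length) :
    pvChunks cs L ≠ [] := by
  have h0 : (0 : Int) ∈ PySem.List.pyRange 0 (cs.length : Int) L := by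
    rw [PySem.List.mem_pyRange_iff_of_pos hL]
    refine ⟨le_rfl, by exact_mod_cast hn, by simp⟩
  intro h
  simp only [pvChunks, List.map_eq_nil_iff] at h
  rw [h] at h0
  exact absurd h0 (List.not_mem_nil)

lemma pvChunks_mem_ne_nil {cs : List Char} {L : Int} (hL : 0 < L) :
    ∀ c ∈ pvChunks cs L, c ≠ [] := by
  intro c hc
  simp only [pvChunks, List.mem_map] at hc
  obtain ⟨i, hi, rfl⟩ := hc
  rw [PySem.List.mem_pyRange_iff_of_pos hL] at hi
  obtain ⟨h0, hlt, -⟩ := hi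
  rw [PySem.List.slice_toNat cs h0 (by omega)]
  intro h
  have := congrArg List.length h
  simp only [List.length_take, List.length_drop, List.length_nil] at this
  omega

-- per-length equality of A's inner computation with the reference cost
lemma inner_eq_A (cs : List Char) (L : Int) (hL : 0 < L) (hn : 0 < cs.length) :
    (((pvChunks cs L ++ [[]]).drop 1).foldl pvStepA (0, (pvChunks cs L).headD [], 1, [])).1
      + (((((pvChunks cs L ++ [[]]).drop 1).foldl pvStepA
            (0, (pvChunks cs L).headD [], 1, [])).2.2.2).length : Int)
    = pvRleCost (pvChunks cs L) := by
  obtain ⟨h, t, harr⟩ := List.exists_cons_of_ne_nil (pvChunks_ne_nil hL hn)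
  have hne := pvChunks_mem_ne_nil hL (cs := cs) (L := L)
  rw [harr] at hne ⊢
  have hdrop : ((h :: t) ++ [([] : List Char)]).drop 1 = t ++ [[]] := rfl
  have hhd : (h :: t).headD ([] : List Char) = h := rfl
  rw [hdrop, hhd,
    pvStepA_fold t 0 h 1 [] (hne h (by simp)) (fun x hx => hne x (by simp [hx])) le_rfl]
  rw [pvRleCost]
  simp only [pvPen]
  have hcast : (((List.takeWhile (fun c => c == h) t).length + 1 : Nat) : Int)
             = 1 + ((List.takeWhile (fun c => c == h) t).length : Int) := by
    push_cast; ring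
  rw [hcast]
  split_ifs with h1 h2
  · ring
  · exfalso; omega
  · exfalso; omega
  · ring

-- ---------- B-side: break positions and edge pairs compute pvRleCost ----------

-- indices j with xs[j] != xs[j+1] (a run break between j and j+1)
def pvNIdx (xs : List (List Char)) : List Nat :=
  (List.range (xs.length - 1)).filter (fun j => !(xs[j]? == xs[j + 1]?))

-- edge positions: 0, each break position + 1, and the total length
def pvEdges (xs : List (List Char)) : List Nat :=
  0 :: ((pvNIdx xs).map (· + 1) ++ [xs.length])

-- cost computed from consecutive edge pairs
def pvCostN (xs : List (List Char)) : Int :=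
  (((pvEdges xs).zip ((pvEdges xs).drop 1)).map
    (fun be => ((xs.getD be.1 []).length : Int) + pvPen (be.2 - be.1))).sum

-- within the head run, every element equals the head
lemma pv_run_getElem? (h : List Char) (t : List (List Char)) (j : Nat)
    (hj : j < (t.takeWhile (fun c => c == h)).length) : t[j]? = some h := by
  have hpre := List.takeWhile_prefix (l := t) (fun c => c == h)
  have hlt : j < t.length := lt_of_lt_of_le hj (List.IsPrefix.length_le hpre)
  have he : (t.takeWhile (fun c => c == h))[j]'hj = t[j]'hlt :=
    List.IsPrefix.getElem hpre hj
  have hb := List.mem_takeWhile_imp (List.getElem_mem hj)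
  rw [List.getElem?_eq_getElem hlt]
  exact congrArg some (he ▸ eq_of_beq hb)

lemma pv_run_getElem?' (h : List Char) (t : List (List Char)) (j : Nat)
    (hj : j < (t.takeWhile (fun c => c == h)).length + 1) :
    (h :: t)[j]? = some h := by
  cases j with
  | zero => rfl
  | succ j => rw [List.getElem?_cons_succ]; exact pv_run_getElem? h t j (by omega)

-- the element just past the takeWhile prefix fails the predicate
lemma pv_takeWhile_boundary {α : Type} (p : α → Bool) :
    ∀ (l : List α) (hlt : (l.takeWhile p).length < l.length),
    p (l[(l.takeWhile p).length]'hlt) = false := by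
  intro l
  induction l with
  | nil => intro h; simp at h
  | cons a t ih =>
    intro hlt
    by_cases hpa : p a = true
    · simp only [List.takeWhile_cons_of_pos hpa, List.length_cons, List.getElem_cons_succ] at hlt ⊢
      exact ih (by omega)
    · have hpa' : p a = false := by
        cases hp : p a
        · rfl
        · exact absurd hp hpa
      simp only [List.takeWhile_cons_of_neg (by simp [hpa'] : ¬ p a = true), List.length_nil,
        List.getElem_cons_zero] at hlt ⊢
      exact hpa'

-- Option BEq on two somes is BEq of the contents
lemma pv_some_beq (x y : List Char) : ((some x == some y) : Bool) = (x == y) := by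
  rfl

-- splitting the break-index list at the first run boundary
lemma pvNIdx_cons (h : List Char) (t : List (List Char))
    (hlt : (t.takeWhile (fun c => c == h)).length < t.length) :
    pvNIdx (h :: t) =
      (t.takeWhile (fun c => c == h)).length ::
        (pvNIdx (t.drop (t.takeWhile (fun c => c == h)).length)).map
          (· + ((t.takeWhile (fun c => c == h)).length + 1)) := by
  set a := (t.takeWhile (fun c => c == h)).length with ha
  unfold pvNIdx
  simp only [List.length_cons, Nat.add_sub_cancel]
  rw [show t.length = a + (t.length - a) by omega, List.range_add, List.filter_append]
  -- first segment: no breaks inside the head run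
  have h1 : (List.range a).filter (fun j => !((h :: t)[j]? == (h :: t)[j + 1]?)) = [] := by
    rw [List.filter_eq_nil_iff]
    intro j hj
    rw [List.mem_range] at hj
    rw [pv_run_getElem?' h t j (by omega), pv_run_getElem?' h t (j + 1) (by omega)]
    simp
  rw [h1, List.nil_append]
  -- second segment: boundary break at index a, then shifted breaks of the rest
  rw [show t.length - a = (t.length - a - 1) + 1 by omega, List.range_succ_eq_map,
    List.map_cons, List.map_map]
  have hbound := pv_takeWhile_boundary (fun c => c == h) t hlt
  have hPa : (!((h :: t)[a + 0]? == (h :: t)[a + 0 + 1]?)) = true := by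
    rw [Nat.add_zero, pv_run_getElem?' h t a (by omega), List.getElem?_cons_succ,
      List.getElem?_eq_getElem hlt, pv_some_beq]
    have hne : h ≠ t[a]'hlt := fun he => by
      rw [← he] at hbound
      simp at hbound
    simp [hne]
  rw [List.filter_cons_of_pos (p := fun j => !((h :: t)[j]? == (h :: t)[j + 1]?)) hPa,
    List.filter_map]
  simp only [Function.comp_def, Nat.succ_eq_add_one, Nat.add_zero]
  have hq : List.filter (fun x => !((h :: t)[a + (x + 1)]? == (h :: t)[a + (x + 1) + 1]?))
        (List.range (t.length - a - 1))
      = List.filter (fun j => !((t.drop a)[j]? == (t.drop a)[j + 1]?))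
          (List.range (t.length - a - 1)) := by
    apply List.filter_congr
    intro i hi
    rw [List.mem_range] at hi
    rw [show a + (i + 1) = (a + i) + 1 by omega, List.getElem?_cons_succ,
      show (a + i) + 1 + 1 = (a + i + 1) + 1 by omega, List.getElem?_cons_succ,
      show (a + i) + 1 = a + (i + 1) by omega,
      ← List.getElem?_drop, ← List.getElem?_drop]
  rw [hq]
  have hlen : (t.drop a).length - 1 = t.length - a - 1 := by
    rw [List.length_drop]
  rw [← hlen]
  congr 1
  apply List.map_congr_left
  intro x _
  omega

-- splitting the edge list at the first run boundary
lemma pvEdges_cons (h : List Char) (t : List (List Char))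
    (hlt : (t.takeWhile (fun c => c == h)).length < t.length) :
    pvEdges (h :: t) =
      0 :: (pvEdges (t.drop (t.takeWhile (fun c => c == h)).length)).map
        (· + ((t.takeWhile (fun c => c == h)).length + 1)) := by
  set a := (t.takeWhile (fun c => c == h)).length with ha
  unfold pvEdges
  rw [pvNIdx_cons h t hlt]
  simp only [List.map_cons, List.map_append, List.map_map, Function.comp_def,
    List.length_cons, List.length_drop, Nat.zero_add, List.cons_append]
  have haux : a ≤ t.length := List.IsPrefix.length_le (List.takeWhile_prefix _)
  congr 1
  congr 1
  simp only [← ha, List.map_nil]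
  congr 1
  · apply List.map_congr_left
    intro x _
    omega
  · congr 1
    omega

lemma pvCostN_eq_rle (N : Nat) : ∀ (xs : List (List Char)), xs.length ≤ N → xs ≠ [] →
    pvCostN xs = pvRleCost xs := by
  induction N with
  | zero =>
    intro xs hlen hne
    obtain ⟨h, t, rfl⟩ := List.exists_cons_of_ne_nil hne
    simp at hlen
  | succ N ih =>
    intro xs hlen hne
    obtain ⟨h, t, rfl⟩ := List.exists_cons_of_ne_nil hne
    set a := (t.takeWhile (fun c => c == h)).length with ha
    have haux : a ≤ t.length := List.IsPrefix.length_le (List.takeWhile_prefix _)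
    by_cases hlt : a < t.length
    · -- the first run ends before the list does
      have hys : t.drop a ≠ [] := by
        intro hcon
        have := congrArg List.length hcon
        simp only [List.length_drop, List.length_nil] at this
        omega
      rw [pvCostN, pvEdges_cons h t hlt]
      rw [show pvEdges (t.drop a)
            = 0 :: ((pvNIdx (t.drop a)).map (· + 1) ++ [(t.drop a).length]) from rfl]
      simp only [List.map_cons, Nat.zero_add, List.drop_succ_cons, List.drop_zero, ← ha]
      rw [List.zip_cons_cons, List.map_cons, List.sum_cons]
      have hzip : ((a + 1) :: ((pvNIdx (t.drop a)).map (· + 1)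
              ++ [(t.drop a).length]).map (· + (a + 1))).zip
            (((pvNIdx (t.drop a)).map (· + 1) ++ [(t.drop a).length]).map (· + (a + 1)))
          = ((0 :: ((pvNIdx (t.drop a)).map (· + 1) ++ [(t.drop a).length])).zip
              ((pvNIdx (t.drop a)).map (· + 1) ++ [(t.drop a).length])).map
              (Prod.map (· + (a + 1)) (· + (a + 1))) := by
        rw [← List.zip_map (f := (· + (a + 1))) (g := (· + (a + 1)))
          (l₁ := 0 :: ((pvNIdx (t.drop a)).map (· + 1) ++ [(t.drop a).length]))
          (l₂ := (pvNIdx (t.drop a)).map (· + 1) ++ [(t.drop a).length])]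
        simp
      rw [hzip, List.map_map]
      have hmap : ∀ be ∈ ((0 :: ((pvNIdx (t.drop a)).map (· + 1) ++ [(t.drop a).length])).zip
            ((pvNIdx (t.drop a)).map (· + 1) ++ [(t.drop a).length])),
          ((fun be => (((h :: t).getD be.1 []).length : Int) + pvPen (be.2 - be.1)) ∘
            Prod.map (· + (a + 1)) (· + (a + 1))) be
          = (fun be => (((t.drop a).getD be.1 []).length : Int) + pvPen (be.2 - be.1)) be := by
        intro be _
        simp only [Function.comp_def, Prod.map, Nat.add_sub_add_right]
        congr 2
        rw [show be.1 + (a + 1) = (a + be.1) + 1 by omega, List.getD_cons_succ,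
          List.getD_eq_getElem?_getD, List.getD_eq_getElem?_getD, List.getElem?_drop]
      rw [List.map_congr_left hmap]
      have hsum : (((0 :: ((pvNIdx (t.drop a)).map (· + 1) ++ [(t.drop a).length])).zip
            ((pvNIdx (t.drop a)).map (· + 1) ++ [(t.drop a).length])).map
            (fun be => (((t.drop a).getD be.1 []).length : Int) + pvPen (be.2 - be.1))).sum
          = pvCostN (t.drop a) := rfl
      rw [hsum, ih (t.drop a) (by simp only [List.length_drop]; simp at hlen; omega) hys]
      rw [pvRleCost]
      rfl
    · -- the whole list is one run
      have haeq : a = t.length := by omega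
      have hnil : pvNIdx (h :: t) = [] := by
        unfold pvNIdx
        rw [List.filter_eq_nil_iff]
        intro j hj
        rw [List.mem_range] at hj
        simp only [List.length_cons, Nat.add_sub_cancel] at hj
        rw [pv_run_getElem?' h t j (by omega), pv_run_getElem?' h t (j + 1) (by omega)]
        simp
      rw [pvCostN, pvEdges, hnil]
      simp only [List.map_nil, List.nil_append, List.length_cons, List.drop_succ_cons,
        List.drop_zero]
      rw [List.zip_cons_cons, List.zip_nil_right, List.map_cons, List.sum_cons]
      have hdrop0 : t.drop a = [] := by rw [haeq]; exact List.drop_length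
      rw [pvRleCost]
      simp only [← ha, hdrop0]
      rw [show pvRleCost ([] : List (List Char)) = 0 by simp [pvRleCost]]
      simp only [List.map_nil, List.sum_nil, add_zero, List.getD_cons_zero, Nat.sub_zero]
      rw [show t.length + 1 = a + 1 by omega]

-- number of chunks: -(-n // L) is the length of the chunk list
lemma pvChunks_len (cs : List Char) (L : Int) (hL : 0 < L) (hn : 0 < cs.length) :
    -(PySem.Int.floordiv (-(cs.length : Int)) L) = ((pvChunks cs L).length : Int) := by
  have hm : (pvChunks cs L).length = (((cs.length : Int) + L - 1) / L).toNat := by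
    unfold pvChunks
    rw [PySem.List.pyRange_of_pos _ _ hL, List.length_map, List.length_map,
      List.length_range, if_pos (by exact_mod_cast hn)]
    norm_num
  rw [hm]
  have hdm := Int.mul_ediv_add_emod ((cs.length : Int) + L - 1) L
  have hr0 : 0 ≤ ((cs.length : Int) + L - 1) % L := Int.emod_nonneg _ (ne_of_gt hL)
  have hrL : ((cs.length : Int) + L - 1) % L < L := Int.emod_lt_of_pos _ hL
  have hn' : (1 : Int) ≤ (cs.length : Int) := by exact_mod_cast hn
  have hq0 : 0 < ((cs.length : Int) + L - 1) / L := by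
    by_contra hq
    rw [not_lt] at hq
    have : L * (((cs.length : Int) + L - 1) / L) ≤ 0 :=
      mul_nonpos_of_nonneg_of_nonpos (le_of_lt hL) hq
    omega
  rw [Int.toNat_of_nonneg (le_of_lt hq0)]
  rw [PySem.Int.neg_floordiv_neg_eq_iff_of_pos hL]
  constructor
  · have e1 : (((cs.length : Int) + L - 1) / L - 1) * L
        = L * (((cs.length : Int) + L - 1) / L) - L := by ring
    omega
  · have e2 : ((cs.length : Int) + L - 1) / L * L
        = L * (((cs.length : Int) + L - 1) / L) := by ring
    omega

-- the j-th chunk is the slice starting at j*L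
lemma pvChunks_get (cs : List Char) (L : Int) (hL : 0 < L) (j : Nat)
    (hj : j < (pvChunks cs L).length) :
    (pvChunks cs L)[j]? =
      some (PySem.List.slice cs (some ((j : Int) * L)) (some (((j : Int) + 1) * L))) := by
  unfold pvChunks at hj ⊢
  rw [PySem.List.pyRange_of_pos _ _ hL] at hj ⊢
  rw [List.length_map, List.length_map, List.length_range] at hj
  rw [List.getElem?_map, List.getElem?_map, List.getElem?_range hj]
  have e1 : 0 + L * (j : Int) = (j : Int) * L := by ring
  have e2 : (j : Int) * L + L = ((j : Int) + 1) * L := by ring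
  simp only [Option.map_some, e1, e2]

-- at every edge position, the slice equals getD on the chunk list
lemma pv_slice_getD (cs : List Char) (L : Int) (hL : 0 < L) (hn : 0 < cs.length) :
    ∀ b ∈ pvEdges (pvChunks cs L),
      PySem.List.slice cs (some ((b : Int) * L)) (some (((b : Int) + 1) * L))
        = (pvChunks cs L).getD b [] := by
  intro b hb
  have hmb := (PySem.Int.neg_floordiv_neg_eq_iff_of_pos hL).mp (pvChunks_len cs L hL hn)
  rcases List.mem_cons.mp hb with rfl | hb'
  · have h0 : 0 < (pvChunks cs L).length :=
      List.length_pos_of_ne_nil (pvChunks_ne_nil hL hn)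
    rw [List.getD_eq_getElem?_getD, pvChunks_get cs L hL 0 h0]
    rfl
  · rcases List.mem_append.mp hb' with hmem | hlast
    · obtain ⟨j, hjmem, rfl⟩ := List.mem_map.mp hmem
      have hjlt : j < (pvChunks cs L).length - 1 := by
        have := (List.mem_filter.mp hjmem).1
        rw [List.mem_range] at this
        exact this
      have hm0 : 0 < (pvChunks cs L).length :=
        List.length_pos_of_ne_nil (pvChunks_ne_nil hL hn)
      have hblt : j + 1 < (pvChunks cs L).length := by omega
      rw [List.getD_eq_getElem?_getD, pvChunks_get cs L hL (j + 1) hblt]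
      push_cast
      rfl
    · rw [List.mem_singleton] at hlast
      subst hlast
      rw [List.getD_eq_getElem?_getD, List.getElem?_eq_none (le_refl _)]
      have h0 : (0 : Int) ≤ ((pvChunks cs L).length : Int) * L :=
        le_trans (Int.natCast_nonneg _) hmb.2
    -- n ≤ m*L, so the slice starts at or past the end of the string
      rw [PySem.List.slice_toNat cs (by positivity) (by positivity)]
      rw [List.drop_eq_nil_of_le (by omega), List.take_nil]
      rfl

-- the Int-side run penalty equals pvPen on the truncated Nat difference
lemma pv_pen_cast (b e : Nat) :
    (if 1 < (e : Int) - (b : Int)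
      then PySem.Int.floordiv ((e : Int) - (b : Int)) 10 + 1 else 0)
    = pvPen (e - b) := by
  unfold pvPen
  by_cases hbe : b ≤ e
  · have hc : ((e - b : Nat) : Int) = (e : Int) - (b : Int) := by omega
    rw [← hc, show (10 : Int) = ((10 : Nat) : Int) from rfl, PySem.Int.floordiv_natCast]
    split_ifs with h1 h2 h3 <;> first | rfl | (exfalso; omega)
  · rw [if_neg (by omega), show e - b = 0 from by omega]
    simp

-- per-length equality of B's inner computation with the reference cost
lemma inner_eq_B (cs : List Char) (L : Int) (hL : 0 < L) (hn : 0 < cs.length) :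
    (((0 :: (((PySem.List.pyRange 1 (-(PySem.Int.floordiv (-(cs.length : Int)) L)) 1).filter
        (fun i => !(PySem.List.slice cs (some ((i - 1) * L)) (some (i * L)) ==
                    PySem.List.slice cs (some (i * L)) (some ((i + 1) * L)))))
        ++ [-(PySem.Int.floordiv (-(cs.length : Int)) L)]) : List Int).zip
      ((0 :: (((PySem.List.pyRange 1 (-(PySem.Int.floordiv (-(cs.length : Int)) L)) 1).filter
        (fun i => !(PySem.List.slice cs (some ((i - 1) * L)) (some (i * L)) ==
                    PySem.List.slice cs (some (i * L)) (some ((i + 1) * L)))))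
        ++ [-(PySem.Int.floordiv (-(cs.length : Int)) L)]) : List Int).drop 1)).map
      (fun be =>
        ((PySem.List.slice cs (some (be.1 * L)) (some ((be.1 + 1) * L))).length : Int)
          + (if 1 < be.2 - be.1
             then PySem.Int.floordiv (be.2 - be.1) 10 + 1 else 0))).sum
    = pvRleCost (pvChunks cs L) := by
  have hnil : pvChunks cs L ≠ [] := pvChunks_ne_nil hL hn
  rw [pvChunks_len cs L hL hn]
  rw [PySem.List.pyRange_one 1 ((pvChunks cs L).length : Int)]
  rw [show (((pvChunks cs L).length : Int) - 1).toNat = (pvChunks cs L).length - 1 by omega]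
  rw [List.filter_map]
  have hfc : List.filter ((fun i : Int =>
        !(PySem.List.slice cs (some ((i - 1) * L)) (some (i * L)) ==
          PySem.List.slice cs (some (i * L)) (some ((i + 1) * L)))) ∘ (fun k : Nat => 1 + (k : Int)))
        (List.range ((pvChunks cs L).length - 1))
      = pvNIdx (pvChunks cs L) := by
    unfold pvNIdx
    apply List.filter_congr
    intro j hj
    rw [List.mem_range] at hj
    simp only [Function.comp_def]
    have e1 : (1 : Int) + (j : Int) - 1 = (j : Int) := by ring
    have e2 : (1 : Int) + (j : Int) = (j : Int) + 1 := by ring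
    have e3 : (j : Int) + 1 + 1 = ((j : Int) + 1) + 1 := by ring
    rw [e1, e2]
    rw [pvChunks_get cs L hL j (by omega), pvChunks_get cs L hL (j + 1) (by omega)]
    push_cast
    rfl
  rw [hfc]
  have hedges : (0 :: ((pvNIdx (pvChunks cs L)).map (fun k : Nat => 1 + (k : Int))
        ++ [((pvChunks cs L).length : Int)]))
      = (pvEdges (pvChunks cs L)).map (fun x : Nat => (x : Int)) := by
    unfold pvEdges
    simp only [List.map_cons, List.map_append, List.map_map, Function.comp_def,
      Nat.cast_zero, List.map_cons, List.map_nil]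
    congr 1
    congr 1
    apply List.map_congr_left
    intro x _
    omega
  rw [hedges]
  rw [show ((pvEdges (pvChunks cs L)).map (fun x : Nat => (x : Int))).drop 1
        = ((pvEdges (pvChunks cs L)).drop 1).map (fun x : Nat => (x : Int)) from
      (List.map_drop).symm]
  rw [List.zip_map, List.map_map]
  have hmap : ∀ be ∈ (pvEdges (pvChunks cs L)).zip ((pvEdges (pvChunks cs L)).drop 1),
      ((fun be : Int × Int =>
          ((PySem.List.slice cs (some (be.1 * L)) (some ((be.1 + 1) * L))).length : Int)
            + (if 1 < be.2 - be.1
               then PySem.Int.floordiv (be.2 - be.1) 10 + 1 else 0)) ∘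
        Prod.map (fun x : Nat => (x : Int)) (fun x : Nat => (x : Int))) be
      = (fun be : Nat × Nat =>
          (((pvChunks cs L).getD be.1 []).length : Int) + pvPen (be.2 - be.1)) be := by
    intro be hbe
    obtain ⟨b, e⟩ := be
    have hb1 : b ∈ pvEdges (pvChunks cs L) := (List.of_mem_zip hbe).1
    simp only [Function.comp_def, Prod.map]
    rw [pv_slice_getD cs L hL hn b hb1, pv_pen_cast b e]
  rw [List.map_congr_left hmap]
  rw [show ((((pvEdges (pvChunks cs L)).zip ((pvEdges (pvChunks cs L)).drop 1)).map
        (fun be : Nat × Nat =>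
          (((pvChunks cs L).getD be.1 []).length : Int) + pvPen (be.2 - be.1))).sum)
      = pvCostN (pvChunks cs L) from rfl]
  exact pvCostN_eq_rle (pvChunks cs L).length (pvChunks cs L) le_rfl hnil

-- ===== VERDICT (by name: the statement is the Claim_ definition above) =====
theorem solution_spec : Claim_equal_solution := by
  intro s _
  unfold Spec_solution solution solution_alt
  dsimp only
  rw [PySem.List.foldl_congr_mem _ _
    (fun acc L => min acc (pvRleCost (pvChunks s.toList L))) _
    (by
      intro acc L hL
      dsimp only
      rw [PySem.List.mem_pyRange_one] at hL
      have hL0 : 0 < L := by omega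
      have hn2 : (1 : Int) ≤ PySem.Int.floordiv ((s.toList.length : Nat) : Int) 2 := by omega
      rw [PySem.Int.floordiv_eq_ediv_of_pos (by omega : (0:Int) < 2)] at hn2
      have hn : 0 < s.toList.length := by omega
      rw [inner_eq_A s.toList L hL0 hn]
      rw [min_def]
      split_ifs <;> omega)]
  conv_rhs => rw [PySem.List.foldl_congr_mem _ _
    (fun acc L => min acc (pvRleCost (pvChunks s.toList L))) _
    (by
      intro acc L hL
      dsimp only
      rw [PySem.List.mem_pyRange_one] at hL
      have hL0 : 0 < L := by omega
      have hn2 : (1 : Int) ≤ PySem.Int.floordiv ((s.toList.length : Nat) : Int) 2 := by omega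
      rw [PySem.Int.floordiv_eq_ediv_of_pos (by omega : (0:Int) < 2)] at hn2
      have hn : 0 < s.toList.length := by omega
      rw [inner_eq_B s.toList L hL0 hn])]
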